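-- pv_equiv track=rewrite | github.com/onewns/TIL | algorithm/BruteForce/BOJ_1759.py | solution
-- ===== SOURCE A (Python) =====
-- from itertools import combinations
--
-- def solution(l, c, alphabets):
--     passwords = []
--     alphabets.sort()
--     vowel = ['a', 'e', 'i', 'o', 'u']
--     for password in combinations(alphabets, l):
--         vowel_cnt = 0
--         cons_cnt = 0
--         for char in password:
--             if char in vowel:
--                 vowel_cnt += 1
--                 continue
--             cons_cnt += 1
--         if vowel_cnt > 0 and cons_cnt > 1:
--             passwords.append(''.join(password))
--     return passwords
-- ===== SOURCE B (Python) =====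
-- def solution(l, c, alphabets):
--     alphabets.sort()
--     vowels = ('a', 'e', 'i', 'o', 'u')
--
--     def dfs(rest, path, v, cn):
--         if len(path) == l:
--             return [''.join(path)] if v > 0 and cn > 1 else []
--         if len(rest) < l - len(path):
--             return []
--         if not rest:
--             return []
--         ch, xs = rest[0], rest[1:]
--         if ch in vowels:
--             chosen = dfs(xs, path + [ch], v + 1, cn)
--         else:
--             chosen = dfs(xs, path + [ch], v, cn + 1)
--         return chosen + dfs(xs, path, v, cn)
--
--     return dfs(alphabets, [], 0, 0)
-- ===== Notes on version B (the rewrite author's own statement) =====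
-- stated objective: alternative
-- what changed: Replaces the itertools.combinations enumeration with a post-filter pass by a recursive DFS over the sorted suffixes that carries the vowel/consonant counters incrementally and emits each valid password at the leaf, producing the same lexicographic order.
import Mathlib
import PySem

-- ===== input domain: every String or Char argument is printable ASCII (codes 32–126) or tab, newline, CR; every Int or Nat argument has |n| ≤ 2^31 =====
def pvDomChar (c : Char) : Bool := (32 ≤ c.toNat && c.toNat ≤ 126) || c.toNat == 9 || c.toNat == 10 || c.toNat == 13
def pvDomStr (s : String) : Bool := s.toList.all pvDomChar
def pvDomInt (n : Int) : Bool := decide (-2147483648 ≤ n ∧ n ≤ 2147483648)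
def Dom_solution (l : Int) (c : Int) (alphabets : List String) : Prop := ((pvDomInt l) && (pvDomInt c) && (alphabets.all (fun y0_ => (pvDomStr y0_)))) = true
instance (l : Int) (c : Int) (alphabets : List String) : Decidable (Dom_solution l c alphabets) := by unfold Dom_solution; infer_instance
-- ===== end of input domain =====

-- B replaces the combinations-then-filter enumeration by a counter-carrying DFS over sorted
-- suffixes (same lexicographic output order); equivalence is about the return value only —
-- both Pythons sort `alphabets` in place.

-- ===== PORT A =====
-- literal transliteration of A: sort, iterate over combinations, count vowels/consonants
-- per combination, append the join when vowel_cnt > 0 and cons_cnt > 1.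
def solution (l : Int) (c : Int) (alphabets : List String) : List String :=
  let sortedAlpha := PySem.List.sorted alphabets (fun x => x) false
  let vowel : List String := ["a", "e", "i", "o", "u"]
  (PySem.List.combinations sortedAlpha l.toNat).foldl
    (fun passwords password =>
      let vc := password.foldl
        (fun (p : Nat × Nat) ch =>
          if ch ∈ vowel then (p.1 + 1, p.2) else (p.1, p.2 + 1)) (0, 0)
      if 0 < vc.1 ∧ 1 < vc.2 then passwords ++ [PySem.Str.join "" password] else passwords)
    []

-- ===== PORT B =====
-- literal transliteration of B's dfs helper
def dfsB (l : Int) (rest : List String) (path : List String) (v : Nat) (cn : Nat) : List String :=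
  if (path.length : Int) = l then
    (if 0 < v ∧ 1 < cn then [PySem.Str.join "" path] else [])
  else if (rest.length : Int) < l - (path.length : Int) then []
  else
    match rest with
    | [] => []
    | ch :: xs =>
      (if ch ∈ (["a", "e", "i", "o", "u"] : List String) then
        dfsB l xs (path ++ [ch]) (v + 1) cn
      else
        dfsB l xs (path ++ [ch]) v (cn + 1)) ++ dfsB l xs path v cn

def solution_alt (l : Int) (c : Int) (alphabets : List String) : List String :=
  dfsB l (PySem.List.sorted alphabets (fun x => x) false) [] 0 0

-- ===== PRECONDITION & SPEC =====
-- Pre_ excludes exactly negative l, on which A raises ValueError (combinations needs r >= 0).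
def Pre_solution (l : Int) (c : Int) (alphabets : List String) : Prop := 0 ≤ l
instance (l : Int) (c : Int) (alphabets : List String) : Decidable (Pre_solution l c alphabets) := by unfold Pre_solution; infer_instance

def pvWitness_solution : Int × Int × List String := (2, 3, ["a", "t", "c"])

def Spec_solution (l : Int) (c : Int) (alphabets : List String) (out : List String) : Prop := out = solution_alt l c alphabets
instance (l : Int) (c : Int) (alphabets : List String) (out : List String) : Decidable (Spec_solution l c alphabets out) := by unfold Spec_solution; infer_instance

-- ===== CLAIM (what is proved, stated in full; the proofs are below) =====
def Claim_equal_solution : Prop := ∀ (l : Int) (c : Int) (alphabets : List String), Dom_solution l c alphabets → Pre_solution l c alphabets → Spec_solution l c alphabets (solution l c alphabets)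

-- ===== LEMMAS AND PROOFS =====
def isVow (s : String) : Bool := s ∈ (["a", "e", "i", "o", "u"] : List String)
def cntV (xs : List String) : Nat := (xs.filter isVow).length
def cntC (xs : List String) : Nat := (xs.filter (fun s => !isVow s)).length

theorem cntV_append_one (p : List String) (x : String) :
    cntV (p ++ [x]) = cntV p + (if isVow x then 1 else 0) := by
  simp [cntV, List.filter_append]; split <;> simp_all
theorem cntC_append_one (p : List String) (x : String) :
    cntC (p ++ [x]) = cntC p + (if isVow x then 0 else 1) := by
  simp [cntC, List.filter_append]; split <;> simp_all

-- A's inner counting loop computes (cntV, cntC)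
theorem vc_loop (pw : List String) : ∀ a b : Nat,
    pw.foldl (fun (p : Nat × Nat) ch =>
      if ch ∈ (["a", "e", "i", "o", "u"] : List String) then (p.1 + 1, p.2) else (p.1, p.2 + 1))
      (a, b) = (a + cntV pw, b + cntC pw) := by
  induction pw with
  | nil => intro a b; simp [cntV, cntC]
  | cons x xs ih =>
    intro a b
    by_cases h : isVow x
    · simp only [List.foldl_cons]
      rw [if_pos (by simpa [isVow] using h), ih]
      simp [cntV, cntC, h]
      omega
    · simp only [List.foldl_cons]
      rw [if_neg (by simpa [isVow] using h), ih]
      simp [cntV, cntC, h]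
      omega

-- the DFS equals the filtered-and-joined combinations of the remaining suffix
theorem dfsB_eq (rest : List String) : ∀ (k : Nat) (path : List String) (l : Int),
    l = (path.length : Int) + (k : Int) →
    dfsB l rest path (cntV path) (cntC path) =
      ((PySem.List.combinations rest k).filter
        (fun cb => decide (0 < cntV (path ++ cb) ∧ 1 < cntC (path ++ cb)))).map
        (fun cb => PySem.Str.join "" (path ++ cb)) := by
  induction rest with
  | nil =>
    intro k path l hl
    cases k with
    | zero =>
      rw [dfsB, if_pos (by omega)]
      simp [PySem.List.combinations_zero]
      split <;> simp_all
    | succ k =>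
      rw [dfsB, if_neg (by push_cast at hl ⊢; omega), if_pos (by push_cast at hl ⊢; simp; omega)]
      simp [PySem.List.combinations_nil_succ]
  | cons x xs ih =>
    intro k path l hl
    cases k with
    | zero =>
      rw [dfsB, if_pos (by omega)]
      simp [PySem.List.combinations_zero]
      split <;> simp_all
    | succ k =>
      by_cases hpr : ((x :: xs).length : Int) < l - (path.length : Int)
      · rw [dfsB, if_neg (by push_cast at hl ⊢; omega), if_pos hpr]
        rw [PySem.List.combinations_eq_nil_of_length_lt (x :: xs) (r := k + 1)
          (by simp only [List.length_cons] at hpr ⊢; push_cast at hl hpr; omega)]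
        simp
      · rw [dfsB, if_neg (by push_cast at hl ⊢; omega), if_neg hpr]
        rw [PySem.List.combinations_cons_succ]
        rw [List.filter_append, List.map_append, List.filter_map, List.map_map]
        have hx : ∀ (v' cn' : Nat), v' = cntV (path ++ [x]) → cn' = cntC (path ++ [x]) →
            dfsB l xs (path ++ [x]) v' cn' =
              ((PySem.List.combinations xs k).filter
                (fun cb => decide (0 < cntV ((path ++ [x]) ++ cb) ∧ 1 < cntC ((path ++ [x]) ++ cb)))).map
                (fun cb => PySem.Str.join "" ((path ++ [x]) ++ cb)) := by
          intro v' cn' hv hcn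
          subst hv; subst hcn
          exact ih k (path ++ [x]) l (by push_cast at hl ⊢; simp; omega)
        have h2 := ih (k + 1) path l hl
        rw [h2]
        congr 1
        · by_cases h : isVow x
          · rw [if_pos (by simpa [isVow] using h),
              hx _ _ (by rw [cntV_append_one]; simp [h]) (by rw [cntC_append_one]; simp [h])]
            simp [Function.comp_def]
          · rw [if_neg (by simpa [isVow] using h),
              hx _ _ (by rw [cntV_append_one]; simp [h]) (by rw [cntC_append_one]; simp [h])]
            simp [Function.comp_def]

-- ===== VERDICT (by name: the statement is the Claim_ definition above) =====
theorem solution_spec : Claim_equal_solution := by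
  intro l c alphabets _ hpre
  unfold Spec_solution solution solution_alt
  simp only []
  have hvc : ∀ (pw : List String),
      pw.foldl (fun (p : Nat × Nat) ch =>
        if ch ∈ (["a", "e", "i", "o", "u"] : List String) then (p.1 + 1, p.2) else (p.1, p.2 + 1))
        (0, 0) = (cntV pw, cntC pw) := by
    intro pw; simpa using vc_loop pw 0 0
  have hfold : ∀ (cs : List (List String)),
      cs.foldl (fun passwords password =>
        let vc := password.foldl
          (fun (p : Nat × Nat) ch =>
            if ch ∈ (["a", "e", "i", "o", "u"] : List String) then (p.1 + 1, p.2) else (p.1, p.2 + 1)) (0, 0)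
        if 0 < vc.1 ∧ 1 < vc.2 then passwords ++ [PySem.Str.join "" password] else passwords) []
      = (cs.filter (fun cb => decide (0 < cntV cb ∧ 1 < cntC cb))).map
          (fun cb => PySem.Str.join "" cb) := by
    intro cs
    have := PySem.List.foldl_append_ite (l := cs)
      (p := fun cb => 0 < cntV cb ∧ 1 < cntC cb)
      (f := fun cb => PySem.Str.join "" cb) (acc := [])
    simp only [List.nil_append] at this
    have hfun : (fun (passwords : List String) password =>
        let vc := password.foldl
          (fun (p : Nat × Nat) ch =>
            if ch ∈ (["a", "e", "i", "o", "u"] : List String) then (p.1 + 1, p.2) else (p.1, p.2 + 1)) (0, 0)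
        if 0 < vc.1 ∧ 1 < vc.2 then passwords ++ [PySem.Str.join "" password] else passwords)
        = (fun (acc : List String) x => if 0 < cntV x ∧ 1 < cntC x then acc ++ [PySem.Str.join "" x] else acc) := by
      funext acc pw
      simp only [hvc pw]
    rw [hfun]
    exact this
  rw [hfold]
  have hd := dfsB_eq (PySem.List.sorted alphabets (fun x => x) false) l.toNat [] l
    (by unfold Pre_solution at hpre; simp; omega)
  have h0v : cntV [] = 0 := rfl
  have h0c : cntC [] = 0 := rfl
  rw [h0v, h0c] at hd
  simp only [List.nil_append] at hd
  exact hd.symm
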